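-- pv_equiv track=rewrite | github.com/gyorokpeter/mroyale-server | util.py | checkCheckCurse
-- ===== SOURCE A (Python) =====
-- def checkCheckCurse(name, blacklist):
--     if len(name) <= 3:
--         return False
--     name = name.lower()
--     for w in blacklist:
--         if len(w) <= 3:
--             continue
--         if w in name:
--             return True
--     return False
-- ===== SOURCE B (Python) =====
-- def checkCheckCurse(name, blacklist):
--     if len(name) <= 3:
--         return False
--     bad = set(w for w in blacklist if len(w) > 3)
--     name = name.lower()
--     n = len(name)
--     lens = set(len(w) for w in bad)
--     for L in lens:
--         for i in range(n - L + 1):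
--             if name[i:i + L] in bad:
--                 return True
--     return False
-- ===== Notes on version B (the rewrite author's own statement) =====
-- stated objective: alternative
-- what changed: Inverted the traversal: B builds a set of the long (len>3) blacklist words and slides a window of each occurring word length over the lowered name, looking every window up in the set, instead of scanning the name once per blacklist word.
import Mathlib
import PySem

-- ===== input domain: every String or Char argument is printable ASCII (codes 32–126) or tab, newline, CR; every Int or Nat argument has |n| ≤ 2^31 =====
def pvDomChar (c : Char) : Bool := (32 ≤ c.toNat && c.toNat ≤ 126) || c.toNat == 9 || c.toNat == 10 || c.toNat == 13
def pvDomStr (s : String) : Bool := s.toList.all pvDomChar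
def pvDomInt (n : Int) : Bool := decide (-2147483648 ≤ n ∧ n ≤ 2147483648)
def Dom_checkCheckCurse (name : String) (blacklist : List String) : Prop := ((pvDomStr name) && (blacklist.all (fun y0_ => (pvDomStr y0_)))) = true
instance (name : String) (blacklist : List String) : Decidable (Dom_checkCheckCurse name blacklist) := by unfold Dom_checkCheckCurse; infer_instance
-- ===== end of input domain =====

-- B inverts the traversal: it builds a set of the long (len > 3) blacklist words and slides a
-- window of each occurring word length over the lowered name, looking each window up in the set,
-- instead of scanning the name once per blacklist word; objective: alternative (no speed claim).

-- ===== PORT A =====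
def checkCheckCurse (name : String) (blacklist : List String) : Bool :=
  if PySem.Str.len name ≤ 3 then false
  else
    let nm := PySem.Str.lower name
    blacklist.any (fun w =>
      if PySem.Str.len w ≤ 3 then false
      else PySem.Str.isIn w nm)

-- ===== PORT B =====
def checkCheckCurse_alt (name : String) (blacklist : List String) : Bool :=
  if PySem.Str.len name ≤ 3 then false
  else
    let bad : PySem.Set String := PySem.Set.ofList (blacklist.filter (fun w => 3 < PySem.Str.len w))
    let nm := PySem.Str.lower name
    let n := PySem.Str.len nm
    let lens : PySem.Set Int := PySem.Set.ofList (bad.map (fun w => PySem.Str.len w))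
    -- iterating a Python set: the loop's Bool result does not depend on the iteration order
    lens.any (fun L =>
      (PySem.List.pyRange 0 (n - L + 1) 1).any (fun i =>
        bad.contains (PySem.Str.slice nm (some i) (some (i + L)))))

-- ===== PRECONDITION & SPEC =====
def Spec_checkCheckCurse (name : String) (blacklist : List String) (out : Bool) : Prop := out = checkCheckCurse_alt name blacklist
instance (name : String) (blacklist : List String) (out : Bool) : Decidable (Spec_checkCheckCurse name blacklist out) := by unfold Spec_checkCheckCurse; infer_instance

-- ===== CLAIM (what is proved, stated in full; the proofs are below) =====
def Claim_equal_checkCheckCurse : Prop := ∀ (name : String) (blacklist : List String), Dom_checkCheckCurse name blacklist → Spec_checkCheckCurse name blacklist (checkCheckCurse name blacklist)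

-- ===== LEMMAS AND PROOFS =====

-- Any substring s[i:j] of a string is an infix of it.
theorem slice_infix (nm : String) (i j : Int) (hi : 0 ≤ i) (hj : 0 ≤ j) :
    (PySem.Str.slice nm (some i) (some j)).toList <:+: nm.toList := by
  rw [PySem.Str.toList_slice]
  show PySem.List.slice nm.toList (some i) (some j) <:+: nm.toList
  rw [PySem.List.slice_toNat nm.toList hi hj]
  exact ((List.take_prefix _ _).isInfix).trans ((List.drop_suffix _ _).isInfix)

-- An infix w of nm is hit by the sliding window of width len w.
theorem infix_to_slice (nm w : String) (hinf : w.toList <:+: nm.toList) :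
    ∃ i : Int, 0 ≤ i ∧ i < PySem.Str.len nm - PySem.Str.len w + 1 ∧
      PySem.Str.slice nm (some i) (some (i + PySem.Str.len w)) = w := by
  obtain ⟨pre, suf, hsplit⟩ := hinf
  have hlen : nm.toList.length = pre.length + w.toList.length + suf.length := by
    rw [← hsplit]; simp; omega
  refine ⟨(pre.length : Int), by positivity, ?_, ?_⟩
  · rw [PySem.Str.len_eq, PySem.Str.len_eq]; omega
  · rw [← String.toList_inj, PySem.Str.toList_slice]
    show PySem.List.slice nm.toList _ _ = w.toList
    rw [PySem.Str.len_eq,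
      PySem.List.slice_toNat nm.toList (by positivity) (by positivity)]
    have h1 : ((pre.length : Int)).toNat = pre.length := by omega
    have h2 : ((pre.length : Int) + (w.toList.length : Int)).toNat = pre.length + w.toList.length := by omega
    rw [h1, h2, ← hsplit, List.append_assoc, List.drop_left]
    have : pre.length + w.toList.length - pre.length = w.toList.length := by omega
    rw [this, List.take_left]

-- The sliding-window lookup succeeds iff some long blacklist word is an infix of nm.
theorem loops_iff (nm : String) (bl : List String) :
    ((PySem.Set.ofList ((PySem.Set.ofList (bl.filter (fun w => 3 < PySem.Str.len w))).map
        (fun w => PySem.Str.len w))).any (fun L =>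
      (PySem.List.pyRange 0 (PySem.Str.len nm - L + 1) 1).any (fun i =>
        (PySem.Set.ofList (bl.filter (fun w => 3 < PySem.Str.len w))).contains
          (PySem.Str.slice nm (some i) (some (i + L))))) = true)
    ↔ ∃ w ∈ bl, ¬ PySem.Str.len w ≤ 3 ∧ PySem.Str.isIn w nm = true := by
  simp only [List.any_eq_true, PySem.List.mem_pyRange_one, PySem.Set.contains_iff,
    PySem.Set.mem_ofList, List.mem_map, List.mem_filter, decide_eq_true_eq,
    PySem.Str.isIn_iff_infix]
  constructor
  · rintro ⟨L, ⟨v, ⟨-, hv3⟩, hvL⟩, i, ⟨hi0, -⟩, hmem, hlen⟩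
    have hL0 : 0 ≤ i + L := by rw [← hvL, PySem.Str.len_eq] at *; omega
    exact ⟨PySem.Str.slice nm (some i) (some (i + L)), hmem, by omega,
      slice_infix nm i (i + L) hi0 hL0⟩
  · rintro ⟨w, hmem, hlen, hinf⟩
    obtain ⟨i, hi0, hin, hslice⟩ := infix_to_slice nm w hinf
    exact ⟨PySem.Str.len w, ⟨w, ⟨hmem, by omega⟩, rfl⟩, i, ⟨hi0, hin⟩,
      by rw [hslice]; exact ⟨hmem, by omega⟩⟩

-- ===== VERDICT (by name: the statement is the Claim_ definition above) =====
theorem checkCheckCurse_spec : Claim_equal_checkCheckCurse := by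
  intro name blacklist _
  show checkCheckCurse name blacklist = checkCheckCurse_alt name blacklist
  unfold checkCheckCurse checkCheckCurse_alt
  split
  · rfl
  · rw [Bool.eq_iff_iff, loops_iff]
    simp only [List.any_eq_true]
    constructor
    · rintro ⟨w, hmem, hw⟩
      by_cases h : PySem.Str.len w ≤ 3
      · rw [if_pos h] at hw; cases hw
      · rw [if_neg h] at hw; exact ⟨w, hmem, h, hw⟩
    · rintro ⟨w, hmem, hlen, hin⟩
      refine ⟨w, hmem, ?_⟩
      rw [if_neg hlen]; exact hin
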